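-- pv_equiv track=rewrite | github.com/alessandra912/alessandra120_nmr2 | 7.Listas/13.exc.py | verificar_positivos_e_negativos
-- ===== SOURCE A (Python) =====
-- def verificar_positivos_e_negativos(lista):
--     soma_positivos = 0
--     negativos = 0
--     for numeros in lista:
--         if numeros < 0:
--             negativos += 1
--         else:
--             soma_positivos += numeros
--     return soma_positivos, negativos
-- ===== SOURCE B (Python) =====
-- def verificar_positivos_e_negativos(lista):
--     # sort ascending: negatives form a prefix; count it, then sum the rest
--     s = sorted(lista)
--     k = 0
--     while k < len(s) and s[k] < 0:
--         k += 1
--     return sum(s[k:]), k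
-- ===== Notes on version B (the rewrite author's own statement) =====
-- stated objective: alternative
-- what changed: Sort-then-scan: sorts the list ascending so negatives form a prefix, counts that prefix with an early-exit scan, and sums the remaining suffix, instead of A's single fused accumulator loop over the unsorted list.
import Mathlib
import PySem

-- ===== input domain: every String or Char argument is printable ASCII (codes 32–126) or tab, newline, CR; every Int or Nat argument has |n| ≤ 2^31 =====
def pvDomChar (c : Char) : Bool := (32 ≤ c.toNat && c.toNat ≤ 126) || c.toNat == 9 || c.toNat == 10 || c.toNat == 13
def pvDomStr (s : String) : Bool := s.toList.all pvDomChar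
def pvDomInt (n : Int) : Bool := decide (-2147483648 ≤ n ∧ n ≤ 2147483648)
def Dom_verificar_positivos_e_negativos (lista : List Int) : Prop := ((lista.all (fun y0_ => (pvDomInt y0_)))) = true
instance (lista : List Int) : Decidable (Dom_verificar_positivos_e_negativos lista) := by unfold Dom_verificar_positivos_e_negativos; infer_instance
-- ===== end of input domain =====

-- B changes the algorithm to sort-then-scan (sort, count the negative prefix, sum the suffix); objective: alternative.

-- ===== PORT A =====
-- literal transliteration of A: one fold carrying (soma_positivos, negativos)
def verificar_positivos_e_negativos (lista : List Int) : Int × Int :=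
  lista.foldl
    (fun st numeros =>
      if numeros < 0 then (st.1, st.2 + 1) else (st.1 + numeros, st.2))
    (0, 0)

-- ===== PORT B =====
-- the 'while k < len(s) and s[k] < 0: k += 1' early-exit scan over the sorted list
def pvScanNeg : List Int → Nat
  | [] => 0
  | x :: xs => if x < 0 then pvScanNeg xs + 1 else 0

-- B: s = sorted(lista); count the negative prefix; return (sum(s[k:]), k)
def verificar_positivos_e_negativos_alt (lista : List Int) : Int × Int :=
  let s := PySem.List.sorted lista (fun x => x) false
  let k := pvScanNeg s
  ((PySem.List.slice s (some (k : Int)) none).sum, (k : Int))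

-- ===== PRECONDITION & SPEC =====
def Spec_verificar_positivos_e_negativos (lista : List Int) (out : Int × Int) : Prop := out = verificar_positivos_e_negativos_alt lista
instance (lista : List Int) (out : Int × Int) : Decidable (Spec_verificar_positivos_e_negativos lista out) := by unfold Spec_verificar_positivos_e_negativos; infer_instance

-- ===== CLAIM =====
def Claim_equal_verificar_positivos_e_negativos : Prop := ∀ (lista : List Int), Dom_verificar_positivos_e_negativos lista → Spec_verificar_positivos_e_negativos lista (verificar_positivos_e_negativos lista)

-- ===== LEMMAS AND PROOFS =====

-- A's fold, started from (a, b), adds the filtered sum and the negative count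
theorem pv_fold_shift (lista : List Int) (a b : Int) :
    lista.foldl
      (fun st numeros =>
        if numeros < 0 then (st.1, st.2 + 1) else (st.1 + numeros, st.2))
      (a, b)
    = (a + (lista.filter (fun x => decide (0 ≤ x))).sum,
       b + ((lista.filter (fun x => decide (x < 0))).length : Int)) := by
  induction lista generalizing a b with
  | nil => simp
  | cons x xs ih =>
    by_cases h : x < 0
    · simp [List.foldl, h, ih, not_le.mpr h]
      ring
    · simp [List.foldl, h, ih, not_lt.mp h]
      ring

-- on an ascending list the early-exit scan reaches exactly the negatives,
-- and what remains is exactly the non-negatives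
theorem pv_scan_sorted (s : List Int) (hs : s.Pairwise (· ≤ ·)) :
    s.drop (pvScanNeg s) = s.filter (fun x => decide (0 ≤ x)) ∧
    pvScanNeg s = (s.filter (fun x => decide (x < 0))).length := by
  induction s with
  | nil => simp [pvScanNeg]
  | cons x xs ih =>
    rcases List.pairwise_cons.mp hs with ⟨hx, hxs⟩
    rcases ih hxs with ⟨ih1, ih2⟩
    by_cases h : x < 0
    · constructor
      · simpa [pvScanNeg, h, not_le.mpr h] using ih1
      · simp [pvScanNeg, h, ih2]
    · have h0 : 0 ≤ x := not_lt.mp h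
      have hall : ∀ y ∈ xs, (0 : Int) ≤ y := fun y hy => le_trans h0 (hx y hy)
      constructor
      · have hfil : xs.filter (fun x => decide ((0:Int) ≤ x)) = xs :=
          List.filter_eq_self.mpr (fun y hy => decide_eq_true (hall y hy))
        simp [pvScanNeg, h, h0, hfil]
      · have hnil : xs.filter (fun x => decide (x < (0:Int))) = [] :=
          List.filter_eq_nil_iff.mpr (fun y hy => by
            simp only [decide_eq_true_eq]; exact not_lt.mpr (hall y hy))
        simp [pvScanNeg, h, hnil]

-- ===== VERDICT =====
theorem verificar_positivos_e_negativos_spec : Claim_equal_verificar_positivos_e_negativos := by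
  intro lista _
  unfold Spec_verificar_positivos_e_negativos verificar_positivos_e_negativos
    verificar_positivos_e_negativos_alt
  set s := PySem.List.sorted lista (fun x => x) false with hsdef
  have hperm : s.Perm lista := PySem.List.sorted_perm lista _ _
  have hpair : s.Pairwise (· ≤ ·) := by
    simpa using PySem.List.sorted_pairwise lista (fun x => x)
  rcases pv_scan_sorted s hpair with ⟨hdrop, hcount⟩
  have hslice : PySem.List.slice s (some ((pvScanNeg s : Nat) : Int)) none = s.drop (pvScanNeg s) :=
    PySem.List.slice_from_natCast s _
  rw [pv_fold_shift]
  have hsum : (s.filter (fun x => decide (0 ≤ x))).sum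
      = (lista.filter (fun x => decide (0 ≤ x))).sum :=
    (hperm.filter _).sum_eq
  have hlen : (s.filter (fun x => decide (x < 0))).length
      = (lista.filter (fun x => decide (x < 0))).length :=
    (hperm.filter _).length_eq
  simp only [hslice, hdrop, hsum]
  rw [Prod.mk.injEq]
  refine ⟨by ring, ?_⟩
  rw [hcount, hlen]
  ring
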